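-- pv_equiv track=rewrite | github.com/bobbob7171/INF1008_P2_Team4 | astar.py | get_path_segments
-- ===== SOURCE A (Python) =====
-- def find_line(station_a: str, station_b: str, graph: dict) -> str:
--     """Return the line code of the edge from station_a to station_b.
--
--     Extracted as a module-level function to avoid identical inner-function
--     duplication in get_path_segments() and get_transfer_stations().
--     Returns 'Unknown' if no such edge exists.
--     """
--     for nb, _, _, line in graph.get(station_a, []):
--         if nb == station_b:
--             return line
--     return "Unknown"
--
-- def get_path_segments(path: list, graph: dict) -> list:
--     """Break a path into contiguous same-line segments.
--
--     Returns [(line_code, [station_names]), ...]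
--
--     Uses the shared find_line() module utility — no duplication.
--     """
--     if len(path) < 2:
--         return []
--
--     segments   = []
--     curr_line  = find_line(path[0], path[1], graph)
--     curr_seg   = [path[0], path[1]]
--
--     for i in range(2, len(path)):
--         line = find_line(path[i - 1], path[i], graph)
--         if line == curr_line or line == "transfer":
--             curr_seg.append(path[i])
--         else:
--             segments.append((curr_line, curr_seg))
--             curr_line = line
--             curr_seg  = [path[i - 1], path[i]]
--
--     segments.append((curr_line, curr_seg))
--     return segments
-- ===== SOURCE B (Python) =====
-- def find_line(station_a: str, station_b: str, graph: dict) -> str: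
--     for nb, _, _, line in graph.get(station_a, []):
--         if nb == station_b:
--             return line
--     return "Unknown"
--
--
-- def _render(path: list, spans: list, n_end: int) -> list:
--     """Turn (label, start_edge) spans into (label, station-slice) segments;
--     each span ends where the next one starts (sharing the boundary station)."""
--     if not spans:
--         return []
--     lab, s = spans[0]
--     if len(spans) == 1:
--         return [(lab, path[s:n_end + 1])]
--     return [(lab, path[s:spans[1][1] + 1])] + _render(path, spans[1:], n_end)
--
--
-- def get_path_segments(path: list, graph: dict) -> list:
--     """Break a path into contiguous same-line segments (boundary-scan version)."""
--     if len(path) < 2: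
--         return []
--     lines = [find_line(path[i], path[i + 1], graph) for i in range(len(path) - 1)]
--     spans = []                 # (label, first edge index) of each finished segment
--     curr, start = lines[0], 0
--     for i in range(1, len(lines)):
--         ln = lines[i]
--         if ln != "transfer" and ln != curr:
--             spans.append((curr, start))
--             curr, start = ln, i
--     spans.append((curr, start))
--     return _render(path, spans, len(lines))
-- ===== Notes on version B (the rewrite author's own statement) =====
-- stated objective: alternative
-- what changed: B precomputes the per-edge line labels in one pass, then scans them once recording only segment boundaries (label, start edge index), and finally materialises each segment by slicing path[start:end+1], instead of A's single loop that grows the current station list and flushes it on each break.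
import Mathlib
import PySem

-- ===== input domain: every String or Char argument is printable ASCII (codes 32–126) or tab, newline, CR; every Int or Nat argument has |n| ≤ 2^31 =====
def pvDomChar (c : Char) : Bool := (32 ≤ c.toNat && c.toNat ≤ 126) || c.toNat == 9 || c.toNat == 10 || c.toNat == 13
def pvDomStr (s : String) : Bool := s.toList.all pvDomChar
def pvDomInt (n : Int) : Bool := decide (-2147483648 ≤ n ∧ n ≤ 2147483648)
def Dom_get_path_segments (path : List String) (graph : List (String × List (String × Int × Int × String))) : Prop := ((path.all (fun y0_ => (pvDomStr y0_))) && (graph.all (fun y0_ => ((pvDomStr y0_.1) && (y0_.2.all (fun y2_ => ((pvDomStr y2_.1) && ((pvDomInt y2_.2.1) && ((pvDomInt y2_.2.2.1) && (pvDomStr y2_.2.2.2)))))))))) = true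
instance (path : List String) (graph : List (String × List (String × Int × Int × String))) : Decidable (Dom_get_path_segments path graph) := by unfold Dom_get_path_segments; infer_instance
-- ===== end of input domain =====

-- B re-decomposes A's segment-growing loop into: per-edge line labels, a boundary
-- scan recording (label, start edge) spans, and a final slicing pass (objective: alternative).

-- ===== PORT A =====
-- graph.get(station_a, []) : first-match lookup in the association list
def pvGraphGetD (graph : List (String × List (String × Int × Int × String))) (k : String) : List (String × Int × Int × String) :=
  match graph with
  | [] => []
  | (a, v) :: rest => if a == k then v else pvGraphGetD rest k

-- the for-loop body of find_line
def findLineGo (station_b : String) : List (String × Int × Int × String) → String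
  | [] => "Unknown"
  | (nb, _, _, line) :: rest => if nb == station_b then line else findLineGo station_b rest

def find_line (station_a station_b : String) (graph : List (String × List (String × Int × Int × String))) : String :=
  findLineGo station_b (pvGraphGetD graph station_a)

-- one iteration of A's for-loop; state = (segments, curr_line, curr_seg)
def gpsStepA (path : List String) (graph : List (String × List (String × Int × Int × String)))
    (st : List (String × List String) × String × List String) (i : Nat) :
    List (String × List String) × String × List String :=
  let line := find_line (path.getD (i - 1) "") (path.getD i "") graph
  if line == st.2.1 || line == "transfer" then
    (st.1, st.2.1, st.2.2 ++ [path.getD i ""])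
  else
    (st.1 ++ [(st.2.1, st.2.2)], line, [path.getD (i - 1) "", path.getD i ""])

def get_path_segments (path : List String) (graph : List (String × List (String × Int × Int × String))) : List (String × List String) :=
  if path.length < 2 then []
  else
    let curr_line := find_line (path.getD 0 "") (path.getD 1 "") graph
    let st := (List.range' 2 (path.length - 2)).foldl (gpsStepA path graph)
                ([], curr_line, [path.getD 0 "", path.getD 1 ""])
    st.1 ++ [(st.2.1, st.2.2)]

-- ===== PORT B =====
-- lines = [find_line(path[i], path[i+1], graph) for i in range(len(path)-1)]
def mkLines (path : List String) (graph : List (String × List (String × Int × Int × String))) : List String :=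
  (List.range (path.length - 1)).map (fun i => find_line (path.getD i "") (path.getD (i + 1) "") graph)

-- _render: each span ends where the next starts; the last one ends at n_end
def renderSpans (path : List String) : List (String × Nat) → Nat → List (String × List String)
  | [], _ => []
  | [(lab, s)], n_end => [(lab, PySem.List.slice path (some ((s : Nat) : Int)) (some ((n_end + 1 : Nat) : Int)))]
  | (lab, s) :: (lab2, s2) :: rest, n_end =>
      (lab, PySem.List.slice path (some ((s : Nat) : Int)) (some ((s2 + 1 : Nat) : Int)))
        :: renderSpans path ((lab2, s2) :: rest) n_end

-- one iteration of B's boundary scan; state = (spans, curr, start)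
def gpsStepB (lines : List String) (st : List (String × Nat) × String × Nat) (i : Nat) :
    List (String × Nat) × String × Nat :=
  let ln := lines.getD i ""
  if ln != "transfer" && ln != st.2.1 then (st.1 ++ [(st.2.1, st.2.2)], ln, i) else st

def get_path_segments_alt (path : List String) (graph : List (String × List (String × Int × Int × String))) : List (String × List String) :=
  if path.length < 2 then []
  else
    let lines := mkLines path graph
    let st := (List.range' 1 (lines.length - 1)).foldl (gpsStepB lines) ([], lines.getD 0 "", 0)
    renderSpans path (st.1 ++ [(st.2.1, st.2.2)]) lines.length

-- ===== PRECONDITION & SPEC =====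
def Spec_get_path_segments (path : List String) (graph : List (String × List (String × Int × Int × String))) (out : List (String × List String)) : Prop := out = get_path_segments_alt path graph
instance (path : List String) (graph : List (String × List (String × Int × Int × String))) (out : List (String × List String)) : Decidable (Spec_get_path_segments path graph out) := by unfold Spec_get_path_segments; infer_instance

-- ===== CLAIM (what is proved, stated in full; the proofs are below) =====
def Claim_equal_get_path_segments : Prop := ∀ (path : List String) (graph : List (String × List (String × Int × Int × String))), Dom_get_path_segments path graph → Spec_get_path_segments path graph (get_path_segments path graph)

-- ===== LEMMAS AND PROOFS =====

theorem mkLines_length (path : List String) (graph : List (String × List (String × Int × Int × String))) :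
    (mkLines path graph).length = path.length - 1 := by
  simp [mkLines]

theorem mkLines_getD (path : List String) (graph : List (String × List (String × Int × Int × String)))
    (i : Nat) (hi : i < path.length - 1) :
    (mkLines path graph).getD i "" = find_line (path.getD i "") (path.getD (i + 1) "") graph := by
  unfold mkLines
  rw [List.getD_eq_getElem?_getD, List.getElem?_map, List.getElem?_range hi]
  rfl

theorem render_snoc (path : List String) (spans : List (String × Nat)) (lab : String) (s n_end : Nat) :
    renderSpans path (spans ++ [(lab, s)]) n_end
      = renderSpans path spans s
          ++ [(lab, PySem.List.slice path (some ((s : Nat) : Int)) (some ((n_end + 1 : Nat) : Int)))] := by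
  induction spans with
  | nil => simp [renderSpans]
  | cons a rest ih =>
    cases rest with
    | nil => simp [renderSpans]
    | cons b rest' =>
      simpa [renderSpans] using ih

theorem seg_snoc (path : List String) (a b : Nat) (hab : a ≤ b) (hb : b < path.length) :
    ((path.drop a).take (b - a)) ++ [path.getD b ""]
      = (path.drop a).take (b + 1 - a) := by
  have h1 : b + 1 - a = (b - a) + 1 := by omega
  rw [h1, List.take_add_one]
  congr 1
  have : (path.drop a)[b - a]? = path[b]? := by
    rw [List.getElem?_drop]; congr 1; omega
  rw [this, List.getElem?_eq_getElem hb]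
  simp [List.getD_eq_getElem?_getD, List.getElem?_eq_getElem hb]

theorem take_two_drop (path : List String) (a : Nat) (h : a + 1 < path.length) :
    (path.drop a).take 2 = [path.getD a "", path.getD (a + 1) ""] := by
  have ha : a < path.length := by omega
  have hd : path.drop a = path[a] :: path[a + 1] :: path.drop (a + 2) := by
    rw [List.drop_eq_getElem_cons ha, List.drop_eq_getElem_cons h]
  rw [hd]
  show [path[a], path[a + 1]] = _
  simp [List.getD_eq_getElem?_getD, List.getElem?_eq_getElem ha, List.getElem?_eq_getElem h]

-- relation between the two loop states after m iterations
theorem gps_inv (path : List String) (graph : List (String × List (String × Int × Int × String)))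
    (hlen : 2 ≤ path.length) (m : Nat) (hm : m + 2 ≤ path.length) :
    ((List.range' 2 m).foldl (gpsStepA path graph)
        ([], find_line (path.getD 0 "") (path.getD 1 "") graph, [path.getD 0 "", path.getD 1 ""])).2.1
      = ((List.range' 1 m).foldl (gpsStepB (mkLines path graph)) ([], (mkLines path graph).getD 0 "", 0)).2.1 ∧
    ((List.range' 1 m).foldl (gpsStepB (mkLines path graph)) ([], (mkLines path graph).getD 0 "", 0)).2.2 ≤ m + 1 ∧
    ((List.range' 2 m).foldl (gpsStepA path graph)
        ([], find_line (path.getD 0 "") (path.getD 1 "") graph, [path.getD 0 "", path.getD 1 ""])).2.2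
      = (path.drop ((List.range' 1 m).foldl (gpsStepB (mkLines path graph)) ([], (mkLines path graph).getD 0 "", 0)).2.2).take
          (m + 2 - ((List.range' 1 m).foldl (gpsStepB (mkLines path graph)) ([], (mkLines path graph).getD 0 "", 0)).2.2) ∧
    ((List.range' 2 m).foldl (gpsStepA path graph)
        ([], find_line (path.getD 0 "") (path.getD 1 "") graph, [path.getD 0 "", path.getD 1 ""])).1
      = renderSpans path ((List.range' 1 m).foldl (gpsStepB (mkLines path graph)) ([], (mkLines path graph).getD 0 "", 0)).1
          ((List.range' 1 m).foldl (gpsStepB (mkLines path graph)) ([], (mkLines path graph).getD 0 "", 0)).2.2 := by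
  induction m with
  | zero =>
    simp only [List.range'_zero, List.foldl_nil]
    refine ⟨(mkLines_getD path graph 0 (by omega)).symm, by simp, ?_, by simp [renderSpans]⟩
    simpa using (take_two_drop path 0 (by omega)).symm
  | succ m ih =>
    have hm' : m + 2 ≤ path.length := by omega
    obtain ⟨h1, h2, h3, h4⟩ := ih hm'
    set sA := (List.range' 2 m).foldl (gpsStepA path graph)
        ([], find_line (path.getD 0 "") (path.getD 1 "") graph, [path.getD 0 "", path.getD 1 ""]) with hsA
    set sB := (List.range' 1 m).foldl (gpsStepB (mkLines path graph)) ([], (mkLines path graph).getD 0 "", 0) with hsB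
    rw [List.range'_concat, List.range'_concat, List.foldl_append, List.foldl_append, ← hsA, ← hsB]
    simp only [List.foldl_cons, List.foldl_nil, one_mul]
    have eln : (mkLines path graph).getD (1 + m) "" = find_line (path.getD (m + 1) "") (path.getD (m + 2) "") graph := by
      rw [show 1 + m = m + 1 by omega]
      exact mkLines_getD path graph (m + 1) (by omega)
    have eA : find_line (path.getD (2 + m - 1) "") (path.getD (2 + m) "") graph
        = find_line (path.getD (m + 1) "") (path.getD (m + 2) "") graph := by
      rw [show 2 + m - 1 = m + 1 by omega, show 2 + m = m + 2 by omega]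
    simp only [gpsStepA, gpsStepB, eln, eA]
    set L := find_line (path.getD (m + 1) "") (path.getD (m + 2) "") graph with hL
    by_cases hc : L = "transfer" ∨ L = sB.2.1
    · -- grow / stay case
      have hca : (L == sA.2.1 || L == "transfer") = true := by
        rcases hc with h | h
        · simp [h]
        · simp [h1, h]
      have hcb : (L != "transfer" && L != sB.2.1) = false := by
        rcases hc with h | h <;> simp [h]
      simp only [hca, hcb, if_true, if_false, Bool.false_eq_true]
      refine ⟨h1, by omega, ?_, h4⟩
      rw [h3, show 2 + m = m + 2 by omega,
        seg_snoc path sB.2.2 (m + 2) (by omega) (by omega)]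
    · -- flush case
      rw [not_or] at hc
      obtain ⟨ht, he⟩ := hc
      have hca : (L == sA.2.1 || L == "transfer") = false := by
        simp [h1, ht, he]
      have hcb : (L != "transfer" && L != sB.2.1) = true := by
        simp [ht, he]
      simp only [hca, hcb, if_true, if_false, Bool.false_eq_true]
      refine ⟨trivial, by omega, ?_, ?_⟩
      · rw [show 2 + m - 1 = m + 1 by omega, show 2 + m = m + 2 by omega,
          show 1 + m = m + 1 by omega,
          ← take_two_drop path (m + 1) (by omega)]
        congr 1
        omega
      · rw [render_snoc, ← h4, ← h1, show 1 + m = m + 1 by omega]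
        congr 2
        rw [h3, PySem.List.slice_natCast]

-- ===== VERDICT (by name: the statement is the Claim_ definition above) =====
theorem get_path_segments_spec : Claim_equal_get_path_segments := by
  unfold Claim_equal_get_path_segments
  intro path graph _
  unfold Spec_get_path_segments get_path_segments get_path_segments_alt
  by_cases h : path.length < 2
  · simp [h]
  · have hlen : 2 ≤ path.length := by omega
    obtain ⟨h1, h2, h3, h4⟩ := gps_inv path graph hlen (path.length - 2) (by omega)
    simp only [h, if_false]
    rw [mkLines_length]
    set sA := (List.range' 2 (path.length - 2)).foldl (gpsStepA path graph)
        ([], find_line (path.getD 0 "") (path.getD 1 "") graph, [path.getD 0 "", path.getD 1 ""]) with hsA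
    set sB := (List.range' 1 (path.length - 1 - 1)).foldl (gpsStepB (mkLines path graph))
        ([], (mkLines path graph).getD 0 "", 0) with hsB
    have hBB : sB = (List.range' 1 (path.length - 2)).foldl (gpsStepB (mkLines path graph))
        ([], (mkLines path graph).getD 0 "", 0) := by
      rw [hsB, show path.length - 1 - 1 = path.length - 2 by omega]
    rw [hBB] at *
    rw [render_snoc, ← h4, ← h1]
    congr 2
    rw [h3, PySem.List.slice_natCast,
      show path.length - 1 + 1 = path.length - 2 + 2 from by omega]
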